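-- pv_equiv track=rewrite | github.com/fanlin31415/Question_5 | q5_solution.py | calculate_penalty
-- ===== SOURCE A (Python) =====
-- def calculate_penalty(grid):
-- 	dirs = [[0, 1], [0, -1], [1, 0], [-1, 0]]
-- 	n = len(grid)
--
-- 	penalty = 0
--
-- 	for i in range(n):
-- 		for j in range(n):
-- 			for dir in dirs:
-- 				x = i + dir[0]
-- 				y = j + dir[1]
-- 				#check boundary validity
-- 				if 0 <= x <= n-1 and 0 <= y <= n-1:
-- 					#update penalty if neighbor gird has same color
-- 					if grid[i][j] == grid[x][y]:
-- 						penalty += 1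
--
-- 	return penalty
-- ===== SOURCE B (Python) =====
-- def calculate_penalty(grid):
--     n = len(grid)
--     h = 0
--     for i in range(n):
--         for j in range(n - 1):
--             if grid[i][j] == grid[i][j + 1]:
--                 h += 1
--     v = 0
--     for i in range(n - 1):
--         for j in range(n):
--             if grid[i][j] == grid[i + 1][j]:
--                 v += 1
--     return 2 * (h + v)
-- ===== Notes on version B (the rewrite author's own statement) =====
-- stated objective: faster
-- what changed: Replaced the per-cell 4-direction bounds-checked neighbor probe with two directed sweeps (horizontal and vertical equal-adjacency counts) whose total is doubled, since each same-color pair is counted once from each side.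
import Mathlib
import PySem

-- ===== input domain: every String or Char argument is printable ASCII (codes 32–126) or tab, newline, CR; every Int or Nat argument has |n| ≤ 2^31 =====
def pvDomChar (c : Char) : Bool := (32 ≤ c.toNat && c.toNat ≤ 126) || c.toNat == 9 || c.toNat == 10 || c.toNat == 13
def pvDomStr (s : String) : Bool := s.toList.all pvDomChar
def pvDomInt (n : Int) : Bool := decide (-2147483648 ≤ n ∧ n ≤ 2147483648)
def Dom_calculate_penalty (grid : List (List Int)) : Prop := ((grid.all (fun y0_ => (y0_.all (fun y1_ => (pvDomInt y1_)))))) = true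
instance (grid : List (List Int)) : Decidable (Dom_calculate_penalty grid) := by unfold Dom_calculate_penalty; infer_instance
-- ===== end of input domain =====

-- B replaces A's per-cell 4-direction bounds-checked probe by two directed adjacency sweeps whose sum is doubled (each pair is seen once from each side).

-- ===== PORT A =====
def calculate_penalty (grid : List (List Int)) : Int :=
  let dirs : List (List Int) := [[0, 1], [0, -1], [1, 0], [-1, 0]]
  let n : Int := (grid.length : Int)
  (PySem.List.pyRange 0 n 1).foldl (fun pen i =>
    (PySem.List.pyRange 0 n 1).foldl (fun pen j =>
      dirs.foldl (fun pen dir =>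
        let x := i + PySem.List.pyGetD dir 0 0
        let y := j + PySem.List.pyGetD dir 1 0
        if 0 ≤ x ∧ x ≤ n - 1 ∧ 0 ≤ y ∧ y ≤ n - 1 then
          if PySem.List.pyGetD (PySem.List.pyGetD grid i []) j 0 =
             PySem.List.pyGetD (PySem.List.pyGetD grid x []) y 0 then pen + 1 else pen
        else pen) pen) pen) 0

-- ===== PORT B =====
def calculate_penalty_alt (grid : List (List Int)) : Int :=
  let n : Int := (grid.length : Int)
  let h : Int := (PySem.List.pyRange 0 n 1).foldl (fun h i =>
    (PySem.List.pyRange 0 (n - 1) 1).foldl (fun h j =>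
      if PySem.List.pyGetD (PySem.List.pyGetD grid i []) j 0 =
         PySem.List.pyGetD (PySem.List.pyGetD grid i []) (j + 1) 0 then h + 1 else h) h) 0
  let v : Int := (PySem.List.pyRange 0 (n - 1) 1).foldl (fun v i =>
    (PySem.List.pyRange 0 n 1).foldl (fun v j =>
      if PySem.List.pyGetD (PySem.List.pyGetD grid i []) j 0 =
         PySem.List.pyGetD (PySem.List.pyGetD grid (i + 1) []) j 0 then v + 1 else v) v) 0
  2 * (h + v)

-- ===== PRECONDITION & SPEC =====
-- Pre_ excludes exactly the ragged grids on which A raises IndexError: when len(grid) ≥ 2,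
-- every cell has an in-bounds neighbor, so a row shorter than len(grid) makes grid[i][j] fail
-- (a 1-row grid is never indexed, since no neighbor is in bounds, and is admitted).
def Pre_calculate_penalty (grid : List (List Int)) : Prop :=
  grid.length ≤ 1 ∨ ∀ row ∈ grid, grid.length ≤ row.length
instance (grid : List (List Int)) : Decidable (Pre_calculate_penalty grid) := by
  unfold Pre_calculate_penalty; infer_instance
def pvWitness_calculate_penalty : List (List Int) := [[0, 1], [1, 1]]
def Spec_calculate_penalty (grid : List (List Int)) (out : Int) : Prop := out = calculate_penalty_alt grid
instance (grid : List (List Int)) (out : Int) : Decidable (Spec_calculate_penalty grid out) := by unfold Spec_calculate_penalty; infer_instance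

-- ===== CLAIM (what is proved, stated in full; the proofs are below) =====
def Claim_equal_calculate_penalty : Prop := ∀ (grid : List (List Int)), Dom_calculate_penalty grid → Pre_calculate_penalty grid → Spec_calculate_penalty grid (calculate_penalty grid)

-- ===== LEMMAS AND PROOFS =====

theorem pv_step_eq (C E : Prop) [Decidable C] [Decidable E] (pen : Int) :
    (if C then (if E then pen + 1 else pen) else pen)
      = pen + (if C then (if E then (1:Int) else 0) else 0) := by
  split_ifs <;> ring

theorem pv_dirs_fold (g : List (List Int)) (n i j pen : Int) :
    ([[0, 1], [0, -1], [1, 0], [-1, 0]] : List (List Int)).foldl (fun pen dir =>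
        let x := i + PySem.List.pyGetD dir 0 0
        let y := j + PySem.List.pyGetD dir 1 0
        if 0 ≤ x ∧ x ≤ n - 1 ∧ 0 ≤ y ∧ y ≤ n - 1 then
          if PySem.List.pyGetD (PySem.List.pyGetD g i []) j 0 =
             PySem.List.pyGetD (PySem.List.pyGetD g x []) y 0 then pen + 1 else pen
        else pen) pen
    = pen +
      ((if 0 ≤ i ∧ i ≤ n - 1 ∧ 0 ≤ j + 1 ∧ j + 1 ≤ n - 1 then
          (if PySem.List.pyGetD (PySem.List.pyGetD g i []) j 0 =
              PySem.List.pyGetD (PySem.List.pyGetD g i []) (j + 1) 0 then (1:Int) else 0) else 0)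
       + (if 0 ≤ i ∧ i ≤ n - 1 ∧ 0 ≤ j + -1 ∧ j + -1 ≤ n - 1 then
          (if PySem.List.pyGetD (PySem.List.pyGetD g i []) j 0 =
              PySem.List.pyGetD (PySem.List.pyGetD g i []) (j + -1) 0 then (1:Int) else 0) else 0)
       + (if 0 ≤ i + 1 ∧ i + 1 ≤ n - 1 ∧ 0 ≤ j ∧ j ≤ n - 1 then
          (if PySem.List.pyGetD (PySem.List.pyGetD g i []) j 0 =
              PySem.List.pyGetD (PySem.List.pyGetD g (i + 1) []) j 0 then (1:Int) else 0) else 0)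
       + (if 0 ≤ i + -1 ∧ i + -1 ≤ n - 1 ∧ 0 ≤ j ∧ j ≤ n - 1 then
          (if PySem.List.pyGetD (PySem.List.pyGetD g i []) j 0 =
              PySem.List.pyGetD (PySem.List.pyGetD g (i + -1) []) j 0 then (1:Int) else 0) else 0)) := by
  simp only [List.foldl_cons, List.foldl_nil,
    show PySem.List.pyGetD ([0, 1] : List Int) 0 0 = 0 from by decide,
    show PySem.List.pyGetD ([0, 1] : List Int) 1 0 = 1 from by decide,
    show PySem.List.pyGetD ([0, -1] : List Int) 0 0 = 0 from by decide,
    show PySem.List.pyGetD ([0, -1] : List Int) 1 0 = -1 from by decide,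
    show PySem.List.pyGetD ([1, 0] : List Int) 0 0 = 1 from by decide,
    show PySem.List.pyGetD ([1, 0] : List Int) 1 0 = 0 from by decide,
    show PySem.List.pyGetD ([-1, 0] : List Int) 0 0 = -1 from by decide,
    show PySem.List.pyGetD ([-1, 0] : List Int) 1 0 = 0 from by decide,
    add_zero]
  rw [pv_step_eq, pv_step_eq, pv_step_eq, pv_step_eq]
  ring_nf

theorem pv_pyRange_pred (N : Nat) :
    PySem.List.pyRange 0 ((N : Int) - 1) 1 = (List.range (N - 1)).map (fun (k : Nat) => (k : Int)) := by
  cases N with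
  | zero =>
    rw [PySem.List.pyRange_one_eq_nil (by omega)]
    simp
  | succ m =>
    rw [show ((Nat.succ m : Nat) : Int) - 1 = ((m : Nat) : Int) from by push_cast; ring,
      PySem.List.pyRange_zero_natCast, Nat.succ_sub_one]

theorem pv_A_eq (g : List (List Int)) :
    calculate_penalty g =
    ((List.range g.length).map (fun (i : Nat) => ((List.range g.length).map (fun (j : Nat) =>
      (if 0 ≤ (i:Int) ∧ (i:Int) ≤ (g.length:Int) - 1 ∧ 0 ≤ (j:Int) + 1 ∧ (j:Int) + 1 ≤ (g.length:Int) - 1 then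
          (if PySem.List.pyGetD (PySem.List.pyGetD g (i:Int) []) (j:Int) 0 =
              PySem.List.pyGetD (PySem.List.pyGetD g (i:Int) []) ((j:Int) + 1) 0 then (1:Int) else 0) else 0)
      + (if 0 ≤ (i:Int) ∧ (i:Int) ≤ (g.length:Int) - 1 ∧ 0 ≤ (j:Int) + -1 ∧ (j:Int) + -1 ≤ (g.length:Int) - 1 then
          (if PySem.List.pyGetD (PySem.List.pyGetD g (i:Int) []) (j:Int) 0 =
              PySem.List.pyGetD (PySem.List.pyGetD g (i:Int) []) ((j:Int) + -1) 0 then (1:Int) else 0) else 0)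
      + (if 0 ≤ (i:Int) + 1 ∧ (i:Int) + 1 ≤ (g.length:Int) - 1 ∧ 0 ≤ (j:Int) ∧ (j:Int) ≤ (g.length:Int) - 1 then
          (if PySem.List.pyGetD (PySem.List.pyGetD g (i:Int) []) (j:Int) 0 =
              PySem.List.pyGetD (PySem.List.pyGetD g ((i:Int) + 1) []) (j:Int) 0 then (1:Int) else 0) else 0)
      + (if 0 ≤ (i:Int) + -1 ∧ (i:Int) + -1 ≤ (g.length:Int) - 1 ∧ 0 ≤ (j:Int) ∧ (j:Int) ≤ (g.length:Int) - 1 then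
          (if PySem.List.pyGetD (PySem.List.pyGetD g (i:Int) []) (j:Int) 0 =
              PySem.List.pyGetD (PySem.List.pyGetD g ((i:Int) + -1) []) (j:Int) 0 then (1:Int) else 0) else 0))).sum)).sum := by
  simp only [calculate_penalty]
  rw [PySem.List.pyRange_zero_natCast]
  simp only [List.foldl_map]
  rw [PySem.List.foldl_congr_mem' (List.range g.length) _
      (fun (acc : Int) (i : Nat) => acc + ((List.range g.length).map (fun (j : Nat) =>
      (if 0 ≤ (i:Int) ∧ (i:Int) ≤ (g.length:Int) - 1 ∧ 0 ≤ (j:Int) + 1 ∧ (j:Int) + 1 ≤ (g.length:Int) - 1 then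
          (if PySem.List.pyGetD (PySem.List.pyGetD g (i:Int) []) (j:Int) 0 =
              PySem.List.pyGetD (PySem.List.pyGetD g (i:Int) []) ((j:Int) + 1) 0 then (1:Int) else 0) else 0)
      + (if 0 ≤ (i:Int) ∧ (i:Int) ≤ (g.length:Int) - 1 ∧ 0 ≤ (j:Int) + -1 ∧ (j:Int) + -1 ≤ (g.length:Int) - 1 then
          (if PySem.List.pyGetD (PySem.List.pyGetD g (i:Int) []) (j:Int) 0 =
              PySem.List.pyGetD (PySem.List.pyGetD g (i:Int) []) ((j:Int) + -1) 0 then (1:Int) else 0) else 0)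
      + (if 0 ≤ (i:Int) + 1 ∧ (i:Int) + 1 ≤ (g.length:Int) - 1 ∧ 0 ≤ (j:Int) ∧ (j:Int) ≤ (g.length:Int) - 1 then
          (if PySem.List.pyGetD (PySem.List.pyGetD g (i:Int) []) (j:Int) 0 =
              PySem.List.pyGetD (PySem.List.pyGetD g ((i:Int) + 1) []) (j:Int) 0 then (1:Int) else 0) else 0)
      + (if 0 ≤ (i:Int) + -1 ∧ (i:Int) + -1 ≤ (g.length:Int) - 1 ∧ 0 ≤ (j:Int) ∧ (j:Int) ≤ (g.length:Int) - 1 then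
          (if PySem.List.pyGetD (PySem.List.pyGetD g (i:Int) []) (j:Int) 0 =
              PySem.List.pyGetD (PySem.List.pyGetD g ((i:Int) + -1) []) (j:Int) 0 then (1:Int) else 0) else 0))).sum) 0
      (by
        intro i hi acc
        rw [PySem.List.foldl_congr_mem' (List.range g.length) _
            (fun (acc : Int) (j : Nat) => acc +
      ((if 0 ≤ (i:Int) ∧ (i:Int) ≤ (g.length:Int) - 1 ∧ 0 ≤ (j:Int) + 1 ∧ (j:Int) + 1 ≤ (g.length:Int) - 1 then
          (if PySem.List.pyGetD (PySem.List.pyGetD g (i:Int) []) (j:Int) 0 =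
              PySem.List.pyGetD (PySem.List.pyGetD g (i:Int) []) ((j:Int) + 1) 0 then (1:Int) else 0) else 0)
      + (if 0 ≤ (i:Int) ∧ (i:Int) ≤ (g.length:Int) - 1 ∧ 0 ≤ (j:Int) + -1 ∧ (j:Int) + -1 ≤ (g.length:Int) - 1 then
          (if PySem.List.pyGetD (PySem.List.pyGetD g (i:Int) []) (j:Int) 0 =
              PySem.List.pyGetD (PySem.List.pyGetD g (i:Int) []) ((j:Int) + -1) 0 then (1:Int) else 0) else 0)
      + (if 0 ≤ (i:Int) + 1 ∧ (i:Int) + 1 ≤ (g.length:Int) - 1 ∧ 0 ≤ (j:Int) ∧ (j:Int) ≤ (g.length:Int) - 1 then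
          (if PySem.List.pyGetD (PySem.List.pyGetD g (i:Int) []) (j:Int) 0 =
              PySem.List.pyGetD (PySem.List.pyGetD g ((i:Int) + 1) []) (j:Int) 0 then (1:Int) else 0) else 0)
      + (if 0 ≤ (i:Int) + -1 ∧ (i:Int) + -1 ≤ (g.length:Int) - 1 ∧ 0 ≤ (j:Int) ∧ (j:Int) ≤ (g.length:Int) - 1 then
          (if PySem.List.pyGetD (PySem.List.pyGetD g (i:Int) []) (j:Int) 0 =
              PySem.List.pyGetD (PySem.List.pyGetD g ((i:Int) + -1) []) (j:Int) 0 then (1:Int) else 0) else 0))) acc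
            (by intro j hj acc; exact pv_dirs_fold g (g.length : Int) (i : Int) (j : Int) acc),
          PySem.List.foldl_add]),
    PySem.List.foldl_add, zero_add]

theorem pv_ite_add (P : Prop) [Decidable P] (a : Int) :
    (if P then a + 1 else a) = a + (if P then (1:Int) else 0) := by
  split_ifs <;> ring

theorem pv_fold_sum (l : List Nat) (P : Nat → Prop) [DecidablePred P] (a : Int) :
    l.foldl (fun acc j => if P j then acc + 1 else acc) a
      = a + (l.map (fun (j : Nat) => if P j then (1:Int) else 0)).sum := by
  rw [PySem.List.foldl_congr_mem' l _ (fun (acc : Int) (j : Nat) => acc + (if P j then (1:Int) else 0)) a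
      (by intro j hj acc; exact pv_ite_add (P j) acc),
    PySem.List.foldl_add]

theorem pv_B_eq (g : List (List Int)) :
    calculate_penalty_alt g =
    2 * (((List.range g.length).map (fun (i : Nat) => ((List.range (g.length - 1)).map (fun (j : Nat) =>
          if PySem.List.pyGetD (PySem.List.pyGetD g (i:Int) []) (j:Int) 0 =
             PySem.List.pyGetD (PySem.List.pyGetD g (i:Int) []) ((j:Int) + 1) 0 then (1:Int) else 0)).sum)).sum
       + ((List.range (g.length - 1)).map (fun (i : Nat) => ((List.range g.length).map (fun (j : Nat) =>
          if PySem.List.pyGetD (PySem.List.pyGetD g (i:Int) []) (j:Int) 0 =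
             PySem.List.pyGetD (PySem.List.pyGetD g ((i:Int) + 1) []) (j:Int) 0 then (1:Int) else 0)).sum)).sum) := by
  simp only [calculate_penalty_alt]
  rw [pv_pyRange_pred, PySem.List.pyRange_zero_natCast]
  simp only [List.foldl_map]
  rw [PySem.List.foldl_congr_mem' (List.range g.length) _
      (fun (acc : Int) (i : Nat) => acc + ((List.range (g.length - 1)).map (fun (j : Nat) =>
        if PySem.List.pyGetD (PySem.List.pyGetD g (i:Int) []) (j:Int) 0 =
           PySem.List.pyGetD (PySem.List.pyGetD g (i:Int) []) ((j:Int) + 1) 0 then (1:Int) else 0)).sum) 0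
      (by intro i hi acc
          exact pv_fold_sum (List.range (g.length - 1))
            (fun j => PySem.List.pyGetD (PySem.List.pyGetD g (i:Int) []) (j:Int) 0 =
              PySem.List.pyGetD (PySem.List.pyGetD g (i:Int) []) ((j:Int) + 1) 0) acc),
    PySem.List.foldl_add, zero_add]
  rw [PySem.List.foldl_congr_mem' (List.range (g.length - 1)) _
      (fun (acc : Int) (i : Nat) => acc + ((List.range g.length).map (fun (j : Nat) =>
        if PySem.List.pyGetD (PySem.List.pyGetD g (i:Int) []) (j:Int) 0 =
           PySem.List.pyGetD (PySem.List.pyGetD g ((i:Int) + 1) []) (j:Int) 0 then (1:Int) else 0)).sum) 0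
      (by intro i hi acc
          exact pv_fold_sum (List.range g.length)
            (fun j => PySem.List.pyGetD (PySem.List.pyGetD g (i:Int) []) (j:Int) 0 =
              PySem.List.pyGetD (PySem.List.pyGetD g ((i:Int) + 1) []) (j:Int) 0) acc),
    PySem.List.foldl_add, zero_add]

theorem pv_L1 (G : Int → Int → Int) (m : Nat) :
    ((List.range (m+1)).map (fun (i : Nat) => ((List.range (m+1)).map (fun (j : Nat) =>
      if 0 ≤ (i:Int) ∧ (i:Int) ≤ ((m+1:Nat):Int) - 1 ∧ 0 ≤ (j:Int) + 1 ∧ (j:Int) + 1 ≤ ((m+1:Nat):Int) - 1 then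
        (if G i j = G i ((j:Int) + 1) then (1:Int) else 0) else 0)).sum)).sum
    = ((List.range (m+1)).map (fun (i : Nat) => ((List.range m).map (fun (j : Nat) =>
        if G i j = G i ((j:Int) + 1) then (1:Int) else 0)).sum)).sum := by
  refine congrArg List.sum (List.map_congr_left ?_)
  intro i hi
  have hi' := List.mem_range.mp hi
  rw [List.range_succ, List.map_append, List.sum_append]
  simp only [List.map_cons, List.map_nil, List.sum_cons, List.sum_nil, add_zero]
  rw [if_neg (by rintro ⟨-, -, -, h⟩; omega), add_zero]
  refine congrArg List.sum (List.map_congr_left ?_)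
  intro j hj
  have hj' := List.mem_range.mp hj
  rw [if_pos ⟨by omega, by omega, by omega, by omega⟩]

theorem pv_L2 (G : Int → Int → Int) (m : Nat) :
    ((List.range (m+1)).map (fun (i : Nat) => ((List.range (m+1)).map (fun (j : Nat) =>
      if 0 ≤ (i:Int) ∧ (i:Int) ≤ ((m+1:Nat):Int) - 1 ∧ 0 ≤ (j:Int) + -1 ∧ (j:Int) + -1 ≤ ((m+1:Nat):Int) - 1 then
        (if G i j = G i ((j:Int) + -1) then (1:Int) else 0) else 0)).sum)).sum
    = ((List.range (m+1)).map (fun (i : Nat) => ((List.range m).map (fun (j : Nat) =>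
        if G i j = G i ((j:Int) + 1) then (1:Int) else 0)).sum)).sum := by
  refine congrArg List.sum (List.map_congr_left ?_)
  intro i hi
  have hi' := List.mem_range.mp hi
  rw [List.range_succ_eq_map, List.map_cons, List.sum_cons, List.map_map]
  rw [if_neg (by rintro ⟨-, -, h, -⟩; omega), zero_add]
  refine congrArg List.sum (List.map_congr_left ?_)
  intro j hj
  have hj' := List.mem_range.mp hj
  simp only [Function.comp_apply, Nat.cast_succ]
  rw [show ((j:Int) + 1 + -1) = (j:Int) from by ring]
  rw [if_pos ⟨by omega, by omega, by omega, by omega⟩]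
  exact if_congr eq_comm rfl rfl

theorem pv_sum_range_succ_map (f : Nat → Int) (n : Nat) :
    ((List.range (n+1)).map f).sum = ((List.range n).map f).sum + f n := by
  rw [List.range_succ, List.map_append, List.sum_append]
  simp

theorem pv_sum_range_succ'_map (f : Nat → Int) (n : Nat) :
    ((List.range (n+1)).map f).sum = f 0 + ((List.range n).map (fun k => f (k+1))).sum := by
  rw [List.range_succ_eq_map, List.map_cons, List.sum_cons, List.map_map]
  rfl

theorem pv_L3 (G : Int → Int → Int) (m : Nat) :
    ((List.range (m+1)).map (fun (i : Nat) => ((List.range (m+1)).map (fun (j : Nat) =>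
      if 0 ≤ (i:Int) + 1 ∧ (i:Int) + 1 ≤ ((m+1:Nat):Int) - 1 ∧ 0 ≤ (j:Int) ∧ (j:Int) ≤ ((m+1:Nat):Int) - 1 then
        (if G i j = G ((i:Int) + 1) j then (1:Int) else 0) else 0)).sum)).sum
    = ((List.range m).map (fun (i : Nat) => ((List.range (m+1)).map (fun (j : Nat) =>
        if G i j = G ((i:Int) + 1) j then (1:Int) else 0)).sum)).sum := by
  rw [pv_sum_range_succ_map]
  rw [show ((List.range (m+1)).map (fun (j : Nat) =>
      if 0 ≤ (m:Int) + 1 ∧ (m:Int) + 1 ≤ ((m+1:Nat):Int) - 1 ∧ 0 ≤ (j:Int) ∧ (j:Int) ≤ ((m+1:Nat):Int) - 1 then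
        (if G (m:Int) (j:Int) = G ((m:Int) + 1) (j:Int) then (1:Int) else 0) else 0)).sum = (0:Int) from
    List.sum_eq_zero (by
      intro x hx
      obtain ⟨j, hj, rfl⟩ := List.mem_map.mp hx
      exact if_neg (by rintro ⟨-, h, -, -⟩; omega)), add_zero]
  refine congrArg List.sum (List.map_congr_left ?_)
  intro i hi
  have hi' := List.mem_range.mp hi
  refine congrArg List.sum (List.map_congr_left ?_)
  intro j hj
  have hj' := List.mem_range.mp hj
  rw [if_pos ⟨by omega, by omega, by omega, by omega⟩]

theorem pv_L4 (G : Int → Int → Int) (m : Nat) :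
    ((List.range (m+1)).map (fun (i : Nat) => ((List.range (m+1)).map (fun (j : Nat) =>
      if 0 ≤ (i:Int) + -1 ∧ (i:Int) + -1 ≤ ((m+1:Nat):Int) - 1 ∧ 0 ≤ (j:Int) ∧ (j:Int) ≤ ((m+1:Nat):Int) - 1 then
        (if G i j = G ((i:Int) + -1) j then (1:Int) else 0) else 0)).sum)).sum
    = ((List.range m).map (fun (i : Nat) => ((List.range (m+1)).map (fun (j : Nat) =>
        if G i j = G ((i:Int) + 1) j then (1:Int) else 0)).sum)).sum := by
  rw [pv_sum_range_succ'_map]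
  rw [show ((List.range (m+1)).map (fun (j : Nat) =>
      if 0 ≤ ((0:Nat):Int) + -1 ∧ ((0:Nat):Int) + -1 ≤ ((m+1:Nat):Int) - 1 ∧ 0 ≤ (j:Int) ∧ (j:Int) ≤ ((m+1:Nat):Int) - 1 then
        (if G ((0:Nat):Int) (j:Int) = G (((0:Nat):Int) + -1) (j:Int) then (1:Int) else 0) else 0)).sum = (0:Int) from
    List.sum_eq_zero (by
      intro x hx
      obtain ⟨j, hj, rfl⟩ := List.mem_map.mp hx
      exact if_neg (by rintro ⟨h, -, -, -⟩; omega)), zero_add]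
  refine congrArg List.sum (List.map_congr_left ?_)
  intro i hi
  have hi' := List.mem_range.mp hi
  simp only [Nat.cast_add, Nat.cast_one]
  rw [show ((i:Int) + 1 + -1) = (i:Int) from by ring]
  refine congrArg List.sum (List.map_congr_left ?_)
  intro j hj
  have hj' := List.mem_range.mp hj
  rw [if_pos ⟨by omega, by omega, by omega, by omega⟩]
  exact if_congr eq_comm rfl rfl

-- ===== VERDICT (by name: the statement is the Claim_ definition above) =====
theorem calculate_penalty_spec : Claim_equal_calculate_penalty := by
  intro grid _ _
  show calculate_penalty grid = calculate_penalty_alt grid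
  rw [pv_A_eq, pv_B_eq]
  cases hN : grid.length with
  | zero => simp
  | succ m =>
    simp only [PySem.List.sum_map_add_int, Nat.add_sub_cancel]
    rw [pv_L1 (fun a b => PySem.List.pyGetD (PySem.List.pyGetD grid a []) b 0) m,
      pv_L2 (fun a b => PySem.List.pyGetD (PySem.List.pyGetD grid a []) b 0) m,
      pv_L3 (fun a b => PySem.List.pyGetD (PySem.List.pyGetD grid a []) b 0) m,
      pv_L4 (fun a b => PySem.List.pyGetD (PySem.List.pyGetD grid a []) b 0) m]
    ring
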